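-- pv_equiv track=rewrite | github.com/tannerr12/Data-Structures-and-Algorithms | 2732-find-a-good-subset-of-the-matrix/2732-find-a-good-subset-of-the-matrix.py | goodSubsetofBinaryMatrix
-- ===== SOURCE A (Python) =====
-- from typing import List
--
-- def goodSubsetofBinaryMatrix(grid: List[List[int]]) -> List[int]:
--     #can never pass 3
--     #5! = 120 possible combinations
--     #only 2 and 4 matter
--
--     #edge case
--     if len(grid) == 1:
--         for j in range(len(grid[0])):
--             if grid[0][j] == 1:
--                 return []
--         return [0]
--
--     res = []
--     row = {}
--     for i in range(len(grid)):
--         mask = 0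
--         for j in range(len(grid[0])):
--             if grid[i][j]:
--                 mask |= (1 << j)
--
--         row[i] = mask
--
--
--     for i in range(len(list(row))):
--         for j in range(i + 1, len(list(row))):
--             if row[i] & row[j] == 0:
--                 return [i,j]
--
--     return []
-- ===== SOURCE B (Python) =====
-- def goodSubsetofBinaryMatrix(grid):
--     # edge case: a single row is good iff it has no 1
--     if len(grid) == 1:
--         return [] if 1 in grid[0] else [0]
--
--     width = len(grid[0]) if grid else 0
--     masks = []
--     for r in grid:
--         m = 0
--         for j in range(width):
--             if r[j]:
--                 m |= 1 << j
--         masks.append(m)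
--
--     # scan rows back to front, keeping for each distinct mask value the
--     # smallest row index seen so far; the last candidate written is the
--     # lexicographically first disjoint pair.
--     first_at = {}
--     best = []
--     for i in range(len(masks) - 1, -1, -1):
--         m = masks[i]
--         cand = [idx for m2, idx in first_at.items() if m & m2 == 0]
--         if cand:
--             best = [i, min(cand)]
--         first_at[m] = i
--     return best
-- ===== Notes on version B (the rewrite author's own statement) =====
-- stated objective: alternative
-- what changed: Replaces A's O(n^2) scan over all index pairs by a single back-to-front pass that keeps, per distinct row-bitmask, the smallest index seen so far and picks the minimal compatible partner from that dictionary, so the inner scan is over distinct masks instead of all later rows.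
import Mathlib
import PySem

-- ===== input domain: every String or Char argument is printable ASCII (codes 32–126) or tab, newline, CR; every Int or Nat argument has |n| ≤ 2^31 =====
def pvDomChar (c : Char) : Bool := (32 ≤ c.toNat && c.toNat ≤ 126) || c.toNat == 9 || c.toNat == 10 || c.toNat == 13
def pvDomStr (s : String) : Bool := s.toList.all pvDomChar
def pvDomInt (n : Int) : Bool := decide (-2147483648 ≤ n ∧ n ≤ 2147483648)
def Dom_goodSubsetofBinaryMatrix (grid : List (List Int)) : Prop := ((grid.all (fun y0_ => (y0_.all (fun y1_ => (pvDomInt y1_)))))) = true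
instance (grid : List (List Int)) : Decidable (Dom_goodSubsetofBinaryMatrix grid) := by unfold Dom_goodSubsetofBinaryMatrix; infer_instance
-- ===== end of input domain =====

-- B replaces A's quadratic scan over all index pairs by one back-to-front pass that keeps,
-- per distinct row-bitmask, the smallest index seen so far and takes the minimal compatible
-- partner from that dictionary (objective: alternative algorithm; equal return values).

-- ===== PORT A =====
-- shared inner loop of both Pythons ('mask |= 1 << j' for truthy r[j]); j comes from
-- pyRange 0 w 1 so j ≥ 0 and the shift amount j.toNat is exact
def pvMaskLoop (r : List Int) (js : List Int) (mask : Int) : Int :=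
  match js with
  | [] => mask
  | j :: rest => pvMaskLoop r rest (if PySem.List.pyGetD r j 0 ≠ 0 then PySem.Int.bor mask ((1 : Int) <<< j.toNat) else mask)

def pvEdgeLoopA (r : List Int) (js : List Int) : List Int :=
  match js with
  | [] => [0]
  | j :: rest => if PySem.List.pyGetD r j 0 = 1 then [] else pvEdgeLoopA r rest

def pvInnerA (row : PySem.Dict Int Int) (i : Int) (js : List Int) : Option Int :=
  match js with
  | [] => none
  | j :: rest => if PySem.Int.band (row.getD i 0) (row.getD j 0) = 0 then some j else pvInnerA row i rest

def pvOuterA (row : PySem.Dict Int Int) (n : Int) (is_ : List Int) : List Int :=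
  match is_ with
  | [] => []
  | i :: rest =>
    match pvInnerA row i (PySem.List.pyRange (i + 1) n 1) with
    | some j => [i, j]
    | none => pvOuterA row n rest

def goodSubsetofBinaryMatrix (grid : List (List Int)) : List Int :=
  if grid.length = 1 then
    pvEdgeLoopA (PySem.List.pyGetD grid 0 []) (PySem.List.pyRange 0 ((PySem.List.pyGetD grid 0 []).length : Int) 1)
  else
    let n : Int := grid.length
    let row : PySem.Dict Int Int :=
      (PySem.List.pyRange 0 n 1).foldl
        (fun d i => d.insert i (pvMaskLoop (PySem.List.pyGetD grid i [])
          (PySem.List.pyRange 0 ((PySem.List.pyGetD grid 0 []).length : Int) 1) 0)) PySem.Dict.empty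
    pvOuterA row n (PySem.List.pyRange 0 n 1)

-- ===== PORT B =====
def pvStepB (masks : List Int) (st : PySem.Dict Int Int × List Int) (i : Int) : PySem.Dict Int Int × List Int :=
  let m := PySem.List.pyGetD masks i 0
  let cand := (st.1.items.filter (fun p => PySem.Int.band m p.1 == 0)).map (fun p => p.2)
  let best := match PySem.List.min? cand (fun x => x) with
    | some v => [i, v]
    | none => st.2
  (st.1.insert m i, best)

def goodSubsetofBinaryMatrix_alt (grid : List (List Int)) : List Int :=
  if grid.length = 1 then
    (if (PySem.List.pyGetD grid 0 []).contains 1 then [] else [0])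
  else
    let width : Int := if grid.length ≠ 0 then ((PySem.List.pyGetD grid 0 []).length : Int) else 0
    let masks : List Int := grid.foldl (fun acc r => acc ++ [pvMaskLoop r (PySem.List.pyRange 0 width 1) 0]) []
    ((PySem.List.pyRange ((masks.length : Int) - 1) (-1) (-1)).foldl (pvStepB masks) (PySem.Dict.empty, [])).2

-- ===== PRECONDITION & SPEC =====
-- Pre_ excludes exactly the ragged grids on which Python A (and B) raises IndexError:
-- with at least two rows, every row must be at least as long as row 0.
def Pre_goodSubsetofBinaryMatrix (grid : List (List Int)) : Prop :=
  ∀ r ∈ grid, (grid.headD []).length ≤ r.length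
instance (grid : List (List Int)) : Decidable (Pre_goodSubsetofBinaryMatrix grid) := by
  unfold Pre_goodSubsetofBinaryMatrix; infer_instance

def pvWitness_goodSubsetofBinaryMatrix : List (List Int) := [[1, 0], [0, 1]]

def Spec_goodSubsetofBinaryMatrix (grid : List (List Int)) (out : List Int) : Prop := out = goodSubsetofBinaryMatrix_alt grid
instance (grid : List (List Int)) (out : List Int) : Decidable (Spec_goodSubsetofBinaryMatrix grid out) := by unfold Spec_goodSubsetofBinaryMatrix; infer_instance

-- ===== CLAIM (what is proved, stated in full; the proofs are below) =====
def Claim_equal_goodSubsetofBinaryMatrix : Prop := ∀ (grid : List (List Int)), Dom_goodSubsetofBinaryMatrix grid → Pre_goodSubsetofBinaryMatrix grid → Spec_goodSubsetofBinaryMatrix grid (goodSubsetofBinaryMatrix grid)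

-- ===== LEMMAS AND PROOFS =====

-- first index ≥ j (scanning left to right) whose element satisfies p
def pvFirst (p : Int → Bool) (ms : List Int) (j : Int) : Option Int :=
  match ms with
  | [] => none
  | x :: xs => if p x then some j else pvFirst p xs (j + 1)

-- lexicographically first disjoint pair among masks ms, indices starting at i
def pvFP (ms : List Int) (i : Int) : List Int :=
  match ms with
  | [] => []
  | x :: xs =>
    match pvFirst (fun y => PySem.Int.band x y == 0) xs (i + 1) with
    | some j => [i, j]
    | none => pvFP xs (i + 1)

theorem pvFirst_none_iff (p : Int → Bool) (l : List Int) (j : Int) :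
    pvFirst p l j = none ↔ ∀ x ∈ l, p x = false := by
  induction l generalizing j with
  | nil => simp [pvFirst]
  | cons x xs ih =>
    simp only [pvFirst, List.mem_cons]
    by_cases h : p x
    · simp [h]
    · rw [if_neg h, ih (j + 1)]
      constructor
      · rintro hall y (rfl | hy)
        · exact Bool.eq_false_iff.mpr h
        · exact hall y hy
      · intro hall y hy; exact hall y (Or.inr hy)

theorem pvFirst_some_spec (p : Int → Bool) (l : List Int) (j v : Int) :
    pvFirst p l j = some v → ∃ t : Nat, ∃ h : t < l.length, v = j + t ∧ p (l[t]'h) = true := by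
  induction l generalizing j with
  | nil => simp [pvFirst]
  | cons x xs ih =>
    simp only [pvFirst]
    by_cases h : p x
    · simp only [h, if_pos]
      rintro hv
      exact ⟨0, by simp, by simpa using hv.symm, by simpa using h⟩
    · simp only [h, if_neg, Bool.false_eq_true, not_false_iff]
      intro hv
      obtain ⟨t, ht, hvt, hp⟩ := ih (j + 1) hv
      exact ⟨t + 1, by simpa using ht, by push_cast; omega, by simpa using hp⟩

theorem pvFirst_exists (p : Int → Bool) (l : List Int) (j : Int) (t : Nat)
    (ht : t < l.length) (hp : p (l[t]'ht) = true) :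
    ∃ v, pvFirst p l j = some v ∧ v ≤ j + t := by
  induction l generalizing j t with
  | nil => simp at ht
  | cons x xs ih =>
    simp only [pvFirst]
    by_cases h : p x
    · exact ⟨j, by simp [h], by omega⟩
    · match t with
      | 0 => simp_all
      | t + 1 =>
        obtain ⟨v, hv, hle⟩ := ih (j + 1) t (by simpa using ht) (by simpa using hp)
        exact ⟨v, by simp [h, hv], by omega⟩

theorem pvGetD_foldl_insert (f : Int → Int) (l : List Int) (d0 : PySem.Dict Int Int) (k : Int) :
    (l.foldl (fun d i => d.insert i (f i)) d0).getD k 0 = if k ∈ l then f k else d0.getD k 0 := by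
  induction l generalizing d0 with
  | nil => simp
  | cons a t ih =>
    simp only [List.foldl_cons, ih, PySem.Dict.getD_insert, List.mem_cons]
    by_cases hk : k ∈ t
    · simp [hk]
    · by_cases hka : k = a <;> simp [hk, hka]

theorem pvInnerA_eq (row : PySem.Dict Int Int) (ms : List Int) (i m : Int)
    (l : List Int) (a : Int) (ha : 0 ≤ a) (ha2 : a.toNat ≤ ms.length)
    (hdrop : ms.drop a.toNat = l)
    (hrow : ∀ j : Int, 0 ≤ j → j < (ms.length : Int) → row.getD j 0 = PySem.List.pyGetD ms j 0)
    (hm : row.getD i 0 = m) :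
    pvInnerA row i (PySem.List.pyRange a (ms.length : Int) 1) =
      pvFirst (fun y => PySem.Int.band m y == 0) l a := by
  induction l generalizing a with
  | nil =>
    have hlen : ms.length ≤ a.toNat := by
      by_contra hlt
      have := List.drop_eq_getElem_cons (l := ms) (i := a.toNat) (by omega)
      rw [hdrop] at this; simp at this; omega
    rw [PySem.List.pyRange_one_eq_nil (by omega)]
    rfl
  | cons x xs ih =>
    have hlt : a.toNat < ms.length := by
      by_contra hge
      rw [List.drop_eq_nil_of_le (by omega)] at hdrop
      simp at hdrop
    have hx : ms[a.toNat]'hlt = x := by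
      have := List.drop_eq_getElem_cons (l := ms) (i := a.toNat) hlt
      rw [hdrop] at this
      exact (List.cons.injEq _ _ _ _ ▸ this).1.symm
    have hxs : ms.drop (a.toNat + 1) = xs := by
      have := List.drop_eq_getElem_cons (l := ms) (i := a.toNat) hlt
      rw [hdrop] at this
      exact (List.cons.injEq _ _ _ _ ▸ this).2.symm
    rw [PySem.List.pyRange_one_cons (by omega)]
    simp only [pvInnerA, pvFirst, hm]
    have hga : row.getD a 0 = x := by
      rw [hrow a ha (by omega), PySem.List.pyGetD_eq_getElem ms 0 ha (by omega), hx]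
    rw [hga]
    by_cases hb : PySem.Int.band m x = 0
    · simp [hb]
    · rw [if_neg hb, if_neg (by simpa using hb)]
      exact ih (a + 1) (by omega) (by omega) (by rw [← hxs]; congr 1; omega)

theorem pvOuterA_eq (row : PySem.Dict Int Int) (ms : List Int)
    (l : List Int) (a : Int) (ha : 0 ≤ a) (ha2 : a.toNat ≤ ms.length)
    (hdrop : ms.drop a.toNat = l)
    (hrow : ∀ j : Int, 0 ≤ j → j < (ms.length : Int) → row.getD j 0 = PySem.List.pyGetD ms j 0) :
    pvOuterA row (ms.length : Int) (PySem.List.pyRange a (ms.length : Int) 1) = pvFP l a := by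
  induction l generalizing a with
  | nil =>
    have hlen : ms.length ≤ a.toNat := by
      by_contra hlt
      have := List.drop_eq_getElem_cons (l := ms) (i := a.toNat) (by omega)
      rw [hdrop] at this; simp at this; omega
    rw [PySem.List.pyRange_one_eq_nil (by omega)]
    rfl
  | cons x xs ih =>
    have hlt : a.toNat < ms.length := by
      by_contra hge
      rw [List.drop_eq_nil_of_le (by omega)] at hdrop
      simp at hdrop
    have hx : ms[a.toNat]'hlt = x := by
      have := List.drop_eq_getElem_cons (l := ms) (i := a.toNat) hlt
      rw [hdrop] at this
      exact (List.cons.injEq _ _ _ _ ▸ this).1.symm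
    have hxs : ms.drop (a.toNat + 1) = xs := by
      have := List.drop_eq_getElem_cons (l := ms) (i := a.toNat) hlt
      rw [hdrop] at this
      exact (List.cons.injEq _ _ _ _ ▸ this).2.symm
    have hga : row.getD a 0 = x := by
      rw [hrow a ha (by omega), PySem.List.pyGetD_eq_getElem ms 0 ha (by omega), hx]
    rw [PySem.List.pyRange_one_cons (by omega)]
    simp only [pvOuterA, pvFP]
    rw [pvInnerA_eq row ms a x xs (a + 1) (by omega) (by omega)
      (by rw [← hxs]; congr 1; omega) hrow hga]
    cases pvFirst (fun y => PySem.Int.band x y == 0) xs (a + 1) with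
    | some j => rfl
    | none => exact ih (a + 1) (by omega) (by omega) (by rw [← hxs]; congr 1; omega)

def pvStB (ms : List Int) (k : Int) : PySem.Dict Int Int × List Int :=
  (PySem.List.pyRange ((ms.length : Int) - 1) (k - 1) (-1)).foldl (pvStepB ms) (PySem.Dict.empty, [])

theorem pvRange_countdown_snoc (n k : Int) (h : k < n) :
    PySem.List.pyRange (n - 1) (k - 1) (-1) = PySem.List.pyRange (n - 1) k (-1) ++ [k] := by
  rw [PySem.List.pyRange_neg_one_eq_reverse, PySem.List.pyRange_neg_one_eq_reverse]
  have h1 : k - 1 + 1 = k := by ring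
  have h2 : n - 1 + 1 = n := by ring
  rw [h1, h2, PySem.List.pyRange_one_cons h]
  simp

theorem pvStB_succ (ms : List Int) (k : Int) (h : k < (ms.length : Int)) :
    pvStB ms k = pvStepB ms (pvStB ms (k + 1)) k := by
  unfold pvStB
  rw [pvRange_countdown_snoc _ _ h, List.foldl_append]
  simp

theorem pvBInv (ms : List Int) (k : Nat) (hk : k ≤ ms.length) :
    (pvStB ms (k : Int)).1.keys.Nodup ∧
    (∀ m v : Int, (pvStB ms (k : Int)).1.get? m = some v ↔
      pvFirst (fun y => y == m) (ms.drop k) (k : Int) = some v) ∧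
    (pvStB ms (k : Int)).2 = pvFP (ms.drop k) (k : Int) := by
  induction hd : ms.length - k generalizing k with
  | zero =>
    have hke : k = ms.length := by omega
    have hnil : pvStB ms (k : Int) = (PySem.Dict.empty, []) := by
      unfold pvStB
      rw [PySem.List.pyRange_neg_one_eq_nil (by omega)]
      rfl
    rw [hnil, hke, List.drop_length]
    refine ⟨PySem.Dict.nodup_keys_empty, ?_, rfl⟩
    intro m v
    simp [pvFirst, PySem.Dict.get?_empty]
  | succ d ih =>
    have hklt : k < ms.length := by omega
    obtain ⟨ih1, ih2, ih3⟩ := ih (k + 1) (by omega) (by omega)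
    have hcast : ((k + 1 : Nat) : Int) = (k : Int) + 1 := by push_cast; ring
    rw [hcast] at ih1 ih2 ih3
    rw [pvStB_succ ms (k : Int) (by exact_mod_cast hklt)]
    set st' := pvStB ms ((k : Int) + 1) with hst'
    set l := ms.drop (k + 1) with hl
    have hm : PySem.List.pyGetD ms (k : Int) 0 = ms[k] := by
      rw [PySem.List.pyGetD_natCast, List.getD_eq_getElem?_getD, List.getElem?_eq_getElem hklt]
      rfl
    -- characterisation of candidate minimum
    have hitems : ∀ m2 idx : Int, (m2, idx) ∈ st'.1.items ↔
        pvFirst (fun y => y == m2) l ((k : Int) + 1) = some idx := by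
      intro m2 idx
      rw [← PySem.Dict.get?_eq_some_iff_mem_items _ _ _ ih1]
      exact ih2 m2 idx
    have hcand : PySem.List.min?
        ((st'.1.items.filter (fun p => PySem.Int.band (ms[k]'hklt) p.1 == 0)).map (fun p => p.2))
        (fun x => x) =
        pvFirst (fun y => PySem.Int.band (ms[k]'hklt) y == 0) l ((k : Int) + 1) := by
      cases hr : pvFirst (fun y => PySem.Int.band (ms[k]'hklt) y == 0) l ((k : Int) + 1) with
      | none =>
        have hnone := (pvFirst_none_iff _ _ _).mp hr
        have hfil : st'.1.items.filter (fun p => PySem.Int.band (ms[k]'hklt) p.1 == 0) = [] := by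
          rw [List.filter_eq_nil_iff]
          rintro ⟨m2, idx⟩ hmem hp
          obtain ⟨t, ht, hidx, hpt⟩ := pvFirst_some_spec _ _ _ _ ((hitems m2 idx).mp hmem)
          have hlm : l[t] = m2 := by simpa using hpt
          have := hnone (l[t]'ht) (List.getElem_mem ht)
          rw [hlm] at this
          simp only at hp
          rw [this] at hp
          exact Bool.noConfusion hp
        rw [hfil]
        simp [PySem.List.min?_eq_none_iff]
      | some j =>
        obtain ⟨ts, hts, hjts, hpts⟩ := pvFirst_some_spec _ _ _ _ hr
        set mstar := l[ts]'hts with hmstar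
        -- the stored first index of mstar is exactly j
        have hfirst_mstar : pvFirst (fun y => y == mstar) l ((k : Int) + 1) = some j := by
          obtain ⟨v, hv, hvle⟩ := pvFirst_exists (fun y => y == mstar) l ((k : Int) + 1) ts hts (by simp [hmstar])
          obtain ⟨t2, ht2, hvt2, hpt2⟩ := pvFirst_some_spec _ _ _ _ hv
          have hl2 : l[t2] = mstar := by simpa using hpt2
          obtain ⟨w, hw, hwle⟩ := pvFirst_exists (fun y => PySem.Int.band (ms[k]'hklt) y == 0) l
            ((k : Int) + 1) t2 ht2 (by rw [hl2]; exact hpts)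
          rw [hr] at hw
          have hwj : w = j := by injection hw with h; omega
          have hvj : v = j := by omega
          rw [hvj] at hv
          exact hv
        have hjmem : j ∈ ((st'.1.items.filter (fun p => PySem.Int.band (ms[k]'hklt) p.1 == 0)).map (fun p => p.2)) := by
          refine List.mem_map.mpr ⟨(mstar, j), List.mem_filter.mpr ⟨?_, ?_⟩, rfl⟩
          · exact (hitems mstar j).mpr hfirst_mstar
          · simpa using hpts
        have hjle : ∀ y ∈ ((st'.1.items.filter (fun p => PySem.Int.band (ms[k]'hklt) p.1 == 0)).map (fun p => p.2)), j ≤ y := by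
          intro y hy
          obtain ⟨⟨m2, idx⟩, hmem, rfl⟩ := List.mem_map.mp hy
          obtain ⟨hmem2, hp2⟩ := List.mem_filter.mp hmem
          obtain ⟨t2, ht2, hvt2, hpt2⟩ := pvFirst_some_spec _ _ _ _ ((hitems m2 idx).mp hmem2)
          have hl2 : l[t2] = m2 := by simpa using hpt2
          obtain ⟨w, hw, hwle⟩ := pvFirst_exists (fun y => PySem.Int.band (ms[k]'hklt) y == 0) l
            ((k : Int) + 1) t2 ht2 (by rw [hl2]; simpa using hp2)
          rw [hr] at hw
          have hwj : w = j := by injection hw with h; omega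
          simp only
          omega
        cases hmin : PySem.List.min?
            ((st'.1.items.filter (fun p => PySem.Int.band (ms[k]'hklt) p.1 == 0)).map (fun p => p.2))
            (fun x => x) with
        | none =>
          rw [PySem.List.min?_eq_none_iff] at hmin
          rw [hmin] at hjmem
          exact absurd hjmem (List.not_mem_nil)
        | some m0 =>
          have h1 : j ≤ m0 := hjle m0 (PySem.List.min?_mem hmin)
          have h2 : m0 ≤ j := PySem.List.min?_isMin hmin j hjmem
          rw [show m0 = j by omega]
    have hdropk : ms.drop k = ms[k] :: l := List.drop_eq_getElem_cons hklt
    refine ⟨?_, ?_, ?_⟩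
    · exact PySem.Dict.nodup_keys_insert _ _ _ ih1
    · intro m' v
      simp only [pvStepB, hm]
      rw [PySem.Dict.get?_insert]
      rw [hdropk]
      simp only [pvFirst]
      by_cases hmm : m' = ms[k]
      · rw [if_pos hmm, if_pos (by simpa using hmm.symm)]
      · rw [if_neg hmm, if_neg (by simpa using fun h => hmm h.symm), ih2]
    · simp only [pvStepB, hm]
      rw [hdropk]
      simp only [pvFP]
      rw [hcand]
      cases pvFirst (fun y => PySem.Int.band (ms[k]'hklt) y == 0) l ((k : Int) + 1) with
      | some j => rfl
      | none => exact ih3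

theorem pvEdge_eq (r : List Int) (l : List Int) (a : Int) (ha : 0 ≤ a) (ha2 : a.toNat ≤ r.length)
    (hdrop : r.drop a.toNat = l) :
    pvEdgeLoopA r (PySem.List.pyRange a (r.length : Int) 1) = (if l.contains 1 then [] else [0]) := by
  induction l generalizing a with
  | nil =>
    have hlen : r.length ≤ a.toNat := by
      by_contra hlt
      have := List.drop_eq_getElem_cons (l := r) (i := a.toNat) (by omega)
      rw [hdrop] at this; simp at this; omega
    rw [PySem.List.pyRange_one_eq_nil (by omega)]
    rfl
  | cons x xs ih =>
    have hlt : a.toNat < r.length := by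
      by_contra hge
      rw [List.drop_eq_nil_of_le (by omega)] at hdrop
      simp at hdrop
    have hx : r[a.toNat]'hlt = x := by
      have := List.drop_eq_getElem_cons (l := r) (i := a.toNat) hlt
      rw [hdrop] at this
      exact (List.cons.injEq _ _ _ _ ▸ this).1.symm
    have hxs : r.drop (a.toNat + 1) = xs := by
      have := List.drop_eq_getElem_cons (l := r) (i := a.toNat) hlt
      rw [hdrop] at this
      exact (List.cons.injEq _ _ _ _ ▸ this).2.symm
    rw [PySem.List.pyRange_one_cons (by omega)]
    simp only [pvEdgeLoopA]
    rw [PySem.List.pyGetD_eq_getElem r 0 ha (by omega), hx]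
    by_cases hb : x = 1
    · simp [hb]
    · rw [if_neg hb, ih (a + 1) (by omega) (by omega) (by rw [← hxs]; congr 1; omega)]
      simp only [List.contains_cons]
      have : (1 == x) = false := by simpa using fun h => hb h.symm
      rw [this]
      simp

-- ===== VERDICT (by name: the statement is the Claim_ definition above) =====
theorem goodSubsetofBinaryMatrix_spec : Claim_equal_goodSubsetofBinaryMatrix := by
  intro grid _ _
  unfold Spec_goodSubsetofBinaryMatrix goodSubsetofBinaryMatrix goodSubsetofBinaryMatrix_alt
  by_cases h1 : grid.length = 1
  · rw [if_pos h1, if_pos h1]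
    exact pvEdge_eq _ _ 0 le_rfl (by simp) (by simp)
  · rw [if_neg h1, if_neg h1]
    by_cases h0 : grid = []
    · subst h0; rfl
    · have hlen0 : grid.length ≠ 0 := by simpa [List.length_eq_zero_iff] using h0
      simp only []
      set w : Int := ((PySem.List.pyGetD grid 0 []).length : Int) with hw
      set msF : List Int := grid.map (fun r => pvMaskLoop r (PySem.List.pyRange 0 w 1) 0) with hmsF
      have hlenF : msF.length = grid.length := by rw [hmsF, List.length_map]
      -- the B-side masks list is msF
      have hmasks : grid.foldl (fun acc r => acc ++ [pvMaskLoop r (PySem.List.pyRange 0 (if grid.length ≠ 0 then w else 0) 1) 0]) ([] : List Int) = msF := by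
        rw [if_pos hlen0]
        exact PySem.List.foldl_append_singleton_eq_map _ _ []
      rw [hmasks]
      -- the A-side dict agrees with msF
      set row : PySem.Dict Int Int :=
        (PySem.List.pyRange 0 (grid.length : Int) 1).foldl
          (fun d i => d.insert i (pvMaskLoop (PySem.List.pyGetD grid i []) (PySem.List.pyRange 0 w 1) 0))
          PySem.Dict.empty with hrowdef
      have hrow : ∀ j : Int, 0 ≤ j → j < (msF.length : Int) → row.getD j 0 = PySem.List.pyGetD msF j 0 := by
        intro j hj hjlt
        have hjg : j < (grid.length : Int) := by rw [← hlenF]; exact_mod_cast hjlt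
        rw [hrowdef, pvGetD_foldl_insert, if_pos (PySem.List.mem_pyRange_one.mpr ⟨hj, hjg⟩)]
        rw [PySem.List.pyGetD_eq_getElem grid ([] : List Int) hj hjg]
        rw [PySem.List.pyGetD_eq_getElem msF (0 : Int) hj (by exact_mod_cast hjlt)]
        simp [hmsF]
      -- both sides equal the first disjoint pair of msF
      have hA : pvOuterA row (grid.length : Int) (PySem.List.pyRange 0 (grid.length : Int) 1) = pvFP msF 0 := by
        have h := pvOuterA_eq row msF msF 0 le_rfl (by simp) (by simp) hrow
        rw [← hlenF]
        exact_mod_cast h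
      have hB : ((PySem.List.pyRange ((msF.length : Int) - 1) (-1) (-1)).foldl (pvStepB msF) (PySem.Dict.empty, ([] : List Int))).2 = pvFP msF 0 := by
        have h := (pvBInv msF 0 (Nat.zero_le _)).2.2
        simp only [Nat.cast_zero, List.drop_zero] at h
        have hst : pvStB msF (0 : Int) = (PySem.List.pyRange ((msF.length : Int) - 1) (-1) (-1)).foldl (pvStepB msF) (PySem.Dict.empty, ([] : List Int)) := by
          unfold pvStB
          norm_num
        rw [← hst, h]
      rw [hA, hB]
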